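-- pv_equiv track=rewrite | github.com/Peyushparmar/TOP-secret | webhook_server.py | _is_opt_out
-- ===== SOURCE A (Python) =====
-- def _is_opt_out(text: str) -> bool:
--     """
--     Returns True if the message is an opt-out request.
--     Covers TCPA-required keywords plus common variations.
--     """
--     keywords = {
--         "stop", "unsubscribe", "cancel", "quit", "end",
--         "optout", "opt out", "opt-out", "remove me",
--         "take me off", "don't text", "dont text",
--         "no more", "stop texting", "stop messaging",
--     }
--     normalized = text.lower().strip().rstrip("!.").strip()
--     return any(normalized == kw or normalized.startswith(kw + " ") for kw in keywords)
-- ===== SOURCE B (Python) =====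
-- KEYWORDS = {
--     "stop", "unsubscribe", "cancel", "quit", "end",
--     "optout", "opt out", "opt-out", "remove me",
--     "take me off", "don't text", "dont text",
--     "no more", "stop texting", "stop messaging",
-- }
--
--
-- def _is_opt_out(text: str) -> bool:
--     """
--     Returns True if the message is an opt-out request.
--     Checks word-prefixes of the normalized message against the keyword set
--     (the longest keyword is 3 words) instead of scanning every keyword.
--     """
--     normalized = text.lower().strip().rstrip("!.").strip()
--     tokens = normalized.split(" ")
--     return any(
--         " ".join(tokens[:n]) in KEYWORDS
--         for n in range(1, min(3, len(tokens)) + 1)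
--     )
-- ===== Notes on version B (the rewrite author's own statement) =====
-- stated objective: alternative
-- what changed: Instead of scanning all 15 keywords and testing equality/startswith for each, B splits the normalized text once on single spaces and checks its 1-, 2- and 3-word prefixes (3 = max keyword word count) by direct set membership.
import Mathlib
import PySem

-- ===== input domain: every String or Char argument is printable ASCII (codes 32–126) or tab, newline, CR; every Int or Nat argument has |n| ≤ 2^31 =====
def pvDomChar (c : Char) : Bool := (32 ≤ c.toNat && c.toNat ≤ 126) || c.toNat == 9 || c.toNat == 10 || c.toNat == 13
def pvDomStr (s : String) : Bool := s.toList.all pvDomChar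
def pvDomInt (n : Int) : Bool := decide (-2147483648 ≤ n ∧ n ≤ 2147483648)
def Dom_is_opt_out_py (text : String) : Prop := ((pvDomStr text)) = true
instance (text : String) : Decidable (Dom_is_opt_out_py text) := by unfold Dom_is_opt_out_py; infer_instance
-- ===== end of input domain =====

-- B checks the 1-, 2- and 3-word space-prefixes of the normalized text against the
-- keyword set instead of scanning every keyword with ==/startswith (alternative decomposition).

-- the Python set literal of opt-out keywords (distinct elements, insertion order)
def pvKeywords : List String :=
  ["stop", "unsubscribe", "cancel", "quit", "end",
   "optout", "opt out", "opt-out", "remove me",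
   "take me off", "don't text", "dont text",
   "no more", "stop texting", "stop messaging"]

-- exact port of Python's str.rstrip("!.") (strip the given chars from the right only)
def pvRstripChars (s : String) (chars : List Char) : String :=
  String.ofList ((s.toList.reverse.dropWhile (fun c => chars.contains c)).reverse)

-- ===== PORT A =====
def is_opt_out_py (text : String) : Bool :=
  let normalized := PySem.Str.strip (pvRstripChars (PySem.Str.strip (PySem.Str.lower text)) ['!', '.'])
  pvKeywords.any (fun kw => normalized == kw || PySem.Str.startswith normalized (kw ++ " "))

-- ===== PORT B =====
def is_opt_out_py_alt (text : String) : Bool :=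
  let normalized := PySem.Str.strip (pvRstripChars (PySem.Str.strip (PySem.Str.lower text)) ['!', '.'])
  let tokens := (PySem.Chars.splitOn normalized.toList [' ']).map String.ofList
  (PySem.List.pyRange 1 (min 3 (tokens.length : Int) + 1) 1).any
    (fun n => pvKeywords.contains (PySem.Str.join " " (tokens.take n.toNat)))

-- ===== PRECONDITION & SPEC =====
def Spec_is_opt_out_py (text : String) (out : Bool) : Prop := out = is_opt_out_py_alt text
instance (text : String) (out : Bool) : Decidable (Spec_is_opt_out_py text out) := by unfold Spec_is_opt_out_py; infer_instance

-- ===== CLAIM (what is proved, stated in full; the proofs are below) =====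
def Claim_equal_is_opt_out_py : Prop := ∀ (text : String), Dom_is_opt_out_py text → Spec_is_opt_out_py text (is_opt_out_py text)

-- ===== LEMMAS AND PROOFS =====

-- reference single-space split (Python s.split(" ")), structural recursion
def pvSplitSp : List Char → List (List Char)
  | [] => [[]]
  | c :: rest =>
    if c = ' ' then [] :: pvSplitSp rest
    else
      match pvSplitSp rest with
      | [] => [[c]]
      | p :: ps => (c :: p) :: ps

lemma pvSplitSp_ne_nil (s : List Char) : pvSplitSp s ≠ [] := by
  cases s with
  | nil => simp [pvSplitSp]
  | cons c rest =>
    simp only [pvSplitSp]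
    split <;> try simp
    split <;> simp

-- helper: prepend to the head piece
def pvHeadCons (p : List Char) : List (List Char) → List (List Char)
  | [] => [p]
  | x :: xs => (p ++ x) :: xs

lemma pvHeadCons_nil (l : List (List Char)) (h : l ≠ []) : pvHeadCons [] l = l := by
  cases l with
  | nil => exact absurd rfl h
  | cons x xs => simp [pvHeadCons]

lemma pvSplitSp_space (rest : List Char) : pvSplitSp (' ' :: rest) = [] :: pvSplitSp rest := by
  simp [pvSplitSp]

lemma pvSplitSp_cons (c : Char) (rest : List Char) (hc : c ≠ ' ') (p : List Char)
    (ps : List (List Char)) (hs : pvSplitSp rest = p :: ps) :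
    pvSplitSp (c :: rest) = (c :: p) :: ps := by
  simp [pvSplitSp, hc, hs]

lemma pvGo_eq (fuel : Nat) : ∀ (l cur : List Char) (acc : List (List Char)),
    l.length < fuel →
    PySem.Chars.splitOn.go [' '] fuel l cur acc = acc.reverse ++ pvHeadCons cur.reverse (pvSplitSp l) := by
  induction fuel with
  | zero => intro l cur acc h; omega
  | succ fuel ih =>
    intro l cur acc h
    cases l with
    | nil => simp [PySem.Chars.splitOn.go, pvSplitSp, pvHeadCons]
    | cons c rest =>
      by_cases hc : c = ' '
      · subst hc
        rw [show PySem.Chars.splitOn.go [' '] (fuel+1) (' ' :: rest) cur acc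
              = PySem.Chars.splitOn.go [' '] fuel rest [] (cur.reverse :: acc) from by
            simp [PySem.Chars.splitOn.go, List.isPrefixOf]]
        rw [ih rest [] (cur.reverse :: acc) (by simpa using Nat.lt_of_succ_lt_succ h)]
        rw [pvSplitSp_space]
        cases hs : pvSplitSp rest with
        | nil => exact absurd hs (pvSplitSp_ne_nil rest)
        | cons p ps => simp [pvHeadCons]
      · rw [show PySem.Chars.splitOn.go [' '] (fuel+1) (c :: rest) cur acc
              = PySem.Chars.splitOn.go [' '] fuel rest (c :: cur) acc from by
            simp [PySem.Chars.splitOn.go, List.isPrefixOf, Ne.symm hc]]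
        rw [ih rest (c :: cur) acc (by simpa using Nat.lt_of_succ_lt_succ h)]
        cases hs : pvSplitSp rest with
        | nil => exact absurd hs (pvSplitSp_ne_nil rest)
        | cons p ps =>
          rw [pvSplitSp_cons c rest hc p ps hs]
          simp [pvHeadCons]

lemma splitOn_eq_pvSplitSp (s : List Char) :
    PySem.Chars.splitOn s [' '] = pvSplitSp s := by
  unfold PySem.Chars.splitOn
  rw [pvGo_eq (s.length + 1) s [] [] (by omega)]
  simp [pvHeadCons_nil _ (pvSplitSp_ne_nil s)]

-- pieces contain no space
lemma pvSplitSp_no_space (s : List Char) : ∀ p ∈ pvSplitSp s, ' ' ∉ p := by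
  induction s with
  | nil => simp [pvSplitSp]
  | cons c rest ih =>
    by_cases hc : c = ' '
    · subst hc; rw [pvSplitSp_space]; simpa using ih
    · cases hs : pvSplitSp rest with
      | nil => exact absurd hs (pvSplitSp_ne_nil rest)
      | cons p ps =>
        rw [pvSplitSp_cons c rest hc p ps hs]
        intro q hq
        rcases List.mem_cons.1 hq with h | h
        · subst h
          intro hm
          rcases List.mem_cons.1 hm with h' | h'
          · exact hc h'.symm
          · exact ih p (hs ▸ List.mem_cons_self ..) h'
        · exact ih q (hs ▸ List.mem_cons_of_mem _ h)

lemma pvJoin_cons2 (a b : List Char) (t : List (List Char)) :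
    PySem.Chars.join [' '] (a :: b :: t) = a ++ ' ' :: PySem.Chars.join [' '] (b :: t) := by
  simp [PySem.Chars.join, List.intercalate, List.intersperse]

lemma pvJoin_single (a : List Char) : PySem.Chars.join [' '] [a] = a := by
  simp [PySem.Chars.join, List.intercalate]

-- join is a left inverse of the split
lemma pvJoin_pvSplitSp (s : List Char) :
    PySem.Chars.join [' '] (pvSplitSp s) = s := by
  induction s with
  | nil => simp [pvSplitSp, PySem.Chars.join, List.intercalate]
  | cons c rest ih =>
    by_cases hc : c = ' '
    · subst hc
      rw [pvSplitSp_space]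
      cases hs : pvSplitSp rest with
      | nil => exact absurd hs (pvSplitSp_ne_nil rest)
      | cons p ps =>
        have ih' : PySem.Chars.join [' '] (p :: ps) = rest := hs ▸ ih
        rw [pvJoin_cons2, ih']
        simp
    · cases hs : pvSplitSp rest with
      | nil => exact absurd hs (pvSplitSp_ne_nil rest)
      | cons p ps =>
        rw [pvSplitSp_cons c rest hc p ps hs]
        cases ps with
        | nil =>
          rw [pvJoin_single]
          rw [hs] at ih; rw [pvJoin_single] at ih; simp [ih]
        | cons q qs =>
          rw [pvJoin_cons2]
          rw [hs] at ih; rw [pvJoin_cons2] at ih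
          simp [ih]

lemma pvSplitSp_no_space_single (a : List Char) (h : ' ' ∉ a) : pvSplitSp a = [a] := by
  induction a with
  | nil => simp [pvSplitSp]
  | cons c rest ih =>
    have hc : c ≠ ' ' := fun hc => h (hc ▸ List.mem_cons_self ..)
    have hr := ih (fun hm => h (List.mem_cons_of_mem _ hm))
    rw [pvSplitSp_cons c rest hc rest [] hr]

lemma pvSplitSp_sep (a b : List Char) (h : ' ' ∉ a) :
    pvSplitSp (a ++ ' ' :: b) = a :: pvSplitSp b := by
  induction a with
  | nil => simp [pvSplitSp_space]
  | cons c rest ih =>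
    have hc : c ≠ ' ' := fun hc => h (hc ▸ List.mem_cons_self ..)
    have hr := ih (fun hm => h (List.mem_cons_of_mem _ hm))
    rw [List.cons_append, pvSplitSp_cons c (rest ++ ' ' :: b) hc (rest) (pvSplitSp b) hr]

-- split of a join of space-free pieces recovers the pieces
lemma pvSplitSp_join (l : List (List Char)) (hne : l ≠ []) (h : ∀ p ∈ l, ' ' ∉ p) :
    pvSplitSp (PySem.Chars.join [' '] l) = l := by
  induction l with
  | nil => exact absurd rfl hne
  | cons a t ih =>
    cases t with
    | nil => rw [pvJoin_single]; exact pvSplitSp_no_space_single a (h a (List.mem_cons_self ..))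
    | cons b t' =>
      rw [pvJoin_cons2, pvSplitSp_sep _ _ (h a (List.mem_cons_self ..))]
      rw [ih (by simp) (fun p hp => h p (List.mem_cons_of_mem _ hp))]

lemma pvJoin_append (l1 l2 : List (List Char)) (h1 : l1 ≠ []) (h2 : l2 ≠ []) :
    PySem.Chars.join [' '] (l1 ++ l2)
      = PySem.Chars.join [' '] l1 ++ ' ' :: PySem.Chars.join [' '] l2 := by
  induction l1 with
  | nil => exact absurd rfl h1
  | cons a t ih =>
    cases t with
    | nil =>
      cases l2 with
      | nil => exact absurd rfl h2
      | cons b t' => simp only [List.singleton_append]; rw [pvJoin_cons2, pvJoin_single]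
    | cons c t' =>
      have := ih (by simp)
      simp only [List.cons_append] at this ⊢
      rw [pvJoin_cons2, this, pvJoin_cons2]
      simp

-- glue lemma: the split of a string prefixed by a join of space-free pieces
lemma pvSplitSp_join_sep (l : List (List Char)) (r : List Char)
    (hne : l ≠ []) (h : ∀ p ∈ l, ' ' ∉ p) :
    pvSplitSp (PySem.Chars.join [' '] l ++ ' ' :: r) = l ++ pvSplitSp r := by
  induction l with
  | nil => exact absurd rfl hne
  | cons a t ih =>
    cases t with
    | nil =>
      rw [pvJoin_single, pvSplitSp_sep _ _ (h a (List.mem_cons_self ..))]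
      rfl
    | cons b t' =>
      rw [pvJoin_cons2, List.append_assoc, List.cons_append,
          pvSplitSp_sep _ _ (h a (List.mem_cons_self ..)),
          ih (by simp) (fun p hp => h p (List.mem_cons_of_mem _ hp))]
      rfl

-- the per-keyword characterization: A's test in terms of word-prefixes of s
lemma pvKey_iff (s kw : List Char) :
    (s = kw ∨ kw ++ [' '] <+: s)
      ↔ ((pvSplitSp kw).length ≤ (pvSplitSp s).length ∧
         PySem.Chars.join [' '] ((pvSplitSp s).take (pvSplitSp kw).length) = kw) := by
  constructor
  · rintro (rfl | ⟨r, hr⟩)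
    · exact ⟨le_refl _, by rw [List.take_length, pvJoin_pvSplitSp]⟩
    · have hs : s = PySem.Chars.join [' '] (pvSplitSp kw) ++ ' ' :: r := by
        rw [pvJoin_pvSplitSp]; simpa using hr.symm
      rw [hs, pvSplitSp_join_sep _ _ (pvSplitSp_ne_nil kw) (pvSplitSp_no_space kw)]
      constructor
      · simp only [List.length_append]
        have := List.length_pos_of_ne_nil (pvSplitSp_ne_nil r)
        omega
      · rw [List.take_left' rfl, pvJoin_pvSplitSp]
  · rintro ⟨hle, hj⟩
    by_cases heq : (pvSplitSp kw).length = (pvSplitSp s).length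
    · left
      rw [heq, List.take_length, pvJoin_pvSplitSp] at hj
      exact hj
    · right
      have hlt : (pvSplitSp kw).length < (pvSplitSp s).length := lt_of_le_of_ne hle heq
      have hsplit : pvSplitSp s
          = (pvSplitSp s).take (pvSplitSp kw).length ++ (pvSplitSp s).drop (pvSplitSp kw).length :=
        (List.take_append_drop _ _).symm
      have htne : (pvSplitSp s).take (pvSplitSp kw).length ≠ [] := by
        have h0 := List.length_pos_of_ne_nil (pvSplitSp_ne_nil kw)
        intro hc
        have hlen := congrArg List.length hc
        rw [List.length_take] at hlen
        simp only [List.length_nil] at hlen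
        omega
      have hdne : (pvSplitSp s).drop (pvSplitSp kw).length ≠ [] := by
        intro hc
        have hlen := congrArg List.length hc
        rw [List.length_drop] at hlen
        simp only [List.length_nil] at hlen
        omega
      have key : s = kw ++ ' ' :: PySem.Chars.join [' '] ((pvSplitSp s).drop (pvSplitSp kw).length) := by
        conv_lhs => rw [← pvJoin_pvSplitSp s, hsplit]
        rw [pvJoin_append _ _ htne hdne, hj]
      exact ⟨PySem.Chars.join [' '] ((pvSplitSp s).drop (pvSplitSp kw).length), by
        conv_rhs => rw [key]
        simp⟩

-- a matching word-prefix determines its word count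
lemma pvN_eq (s kw : List Char) (n : Nat) (h1 : 1 ≤ n) (h2 : n ≤ (pvSplitSp s).length)
    (hj : PySem.Chars.join [' '] ((pvSplitSp s).take n) = kw) :
    n = (pvSplitSp kw).length := by
  have htne : (pvSplitSp s).take n ≠ [] := by
    intro hc
    have := congrArg List.length hc
    simp [min_eq_left h2] at this <;> omega
  have := pvSplitSp_join ((pvSplitSp s).take n) htne
      (fun p hp => pvSplitSp_no_space s p (List.mem_of_mem_take hp))
  rw [hj] at this
  rw [this, List.length_take, min_eq_left h2]

-- all keywords have between 1 and 3 words
lemma pvKeywords_words : ∀ kw ∈ pvKeywords,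
    1 ≤ (pvSplitSp kw.toList).length ∧ (pvSplitSp kw.toList).length ≤ 3 := by decide

-- core equivalence at the level of the normalized char list
lemma pvCore (s : List Char) :
    (pvKeywords.any (fun kw => s == kw.toList || (kw.toList ++ [' ']).isPrefixOf s))
      = ((PySem.List.pyRange 1 (min 3 ((pvSplitSp s).length : Int) + 1) 1).any
          (fun n => pvKeywords.contains
            (String.ofList (PySem.Chars.join [' '] ((pvSplitSp s).take n.toNat))))) := by
  apply Bool.eq_iff_iff.2
  simp only [List.any_eq_true, Bool.or_eq_true, beq_iff_eq, List.isPrefixOf_iff_prefix,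
    PySem.List.mem_pyRange_one, List.contains_eq_mem, decide_eq_true_eq]
  constructor
  · rintro ⟨kw, hkw, hA⟩
    have hiff := (pvKey_iff s kw.toList).1 hA
    obtain ⟨h1, h3⟩ := pvKeywords_words kw hkw
    refine ⟨((pvSplitSp kw.toList).length : Int), ⟨by exact_mod_cast h1, ?_⟩, ?_⟩
    · have := hiff.1
      omega
    · rw [Int.toNat_natCast, hiff.2]
      simpa using hkw
  · rintro ⟨n, ⟨hn1, hn2⟩, hmem⟩
    set kw := String.ofList (PySem.Chars.join [' '] ((pvSplitSp s).take n.toNat)) with hkwdef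
    refine ⟨kw, hmem, ?_⟩
    have hkl : kw.toList = PySem.Chars.join [' '] ((pvSplitSp s).take n.toNat) := by
      rw [hkwdef]; simp
    have hn1' : 1 ≤ n.toNat := by omega
    have hn2' : n.toNat ≤ (pvSplitSp s).length := by omega
    have hne := pvN_eq s kw.toList n.toNat hn1' hn2' hkl.symm
    exact (pvKey_iff s kw.toList).2 ⟨hne ▸ hn2', hne ▸ hkl.symm⟩

-- ===== VERDICT (by name: the statement is the Claim_ definition above) =====
theorem is_opt_out_py_spec : Claim_equal_is_opt_out_py := by
  intro text _
  unfold Spec_is_opt_out_py is_opt_out_py is_opt_out_py_alt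
  generalize (PySem.Str.strip (pvRstripChars (PySem.Str.strip (PySem.Str.lower text)) ['!', '.'])) = z
  have hA : (pvKeywords.any (fun kw => z == kw || PySem.Str.startswith z (kw ++ " ")))
      = (pvKeywords.any (fun kw => z.toList == kw.toList || (kw.toList ++ [' ']).isPrefixOf z.toList)) := by
    refine List.any_congr rfl (fun kw => ?_)
    have h1 : (z == kw) = (z.toList == kw.toList) := by simp [String.ext_iff]
    have h2 : PySem.Str.startswith z (kw ++ " ") = (kw.toList ++ [' ']).isPrefixOf z.toList := by
      simp [PySem.Str.startswith_eq, PySem.Chars.startswith, String.toList_append]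
    rw [h1, h2]
  rw [hA, pvCore z.toList]
  simp only [splitOn_eq_pvSplitSp]
  refine List.any_congr (by rw [List.length_map]) (fun n => ?_)
  have hj : PySem.Str.join " " (((pvSplitSp z.toList).map String.ofList).take n.toNat)
      = String.ofList (PySem.Chars.join [' '] ((pvSplitSp z.toList).take n.toNat)) := by
    apply String.ext
    simp [PySem.Str.toList_join, List.map_take, List.map_map, Function.comp_def]
  rw [hj]
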